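-- pv_equiv track=rewrite | github.com/MrCairo/pygbasm | LR35902_asm/core/tokens/tokenizer.py | _explode_brackets
-- ===== SOURCE A (Python) =====
-- def _explode_brackets(text: str) -> str:
--     """Return a string with brackets exploded for splitting."""
--     """
--     There are three types of brackets recognized:
--         Round brackets: ()
--         Square brackets: []
--         Curly brackets: {}
--     Also, the double quote and single quote values are also
--     added to this as then also are used to enclose data.
--     """
--     brackets = "\"'([{}])"
--     exploded = text
--     if any(char in text for char in brackets):
--         for char in brackets:
--             exploded = exploded.replace(char, f" {char} ")
--     return exploded
-- ===== SOURCE B (Python) =====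
-- _BRACKETS = set("\"'([{}])")
--
--
-- def _explode_brackets(text: str) -> str:
--     """Return a string with brackets exploded for splitting.
--
--     Single pass: pad every bracket/quote character with spaces, keep the rest.
--     """
--     return "".join(f" {c} " if c in _BRACKETS else c for c in text)
-- ===== Notes on version B (the rewrite author's own statement) =====
-- stated objective: idiomatic
-- what changed: Replaces the bracket-membership guard plus eight sequential full-string replace passes by a single pass over the characters that emits each bracket/quote character padded with one space on each side and every other character unchanged, joined once.
import Mathlib
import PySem

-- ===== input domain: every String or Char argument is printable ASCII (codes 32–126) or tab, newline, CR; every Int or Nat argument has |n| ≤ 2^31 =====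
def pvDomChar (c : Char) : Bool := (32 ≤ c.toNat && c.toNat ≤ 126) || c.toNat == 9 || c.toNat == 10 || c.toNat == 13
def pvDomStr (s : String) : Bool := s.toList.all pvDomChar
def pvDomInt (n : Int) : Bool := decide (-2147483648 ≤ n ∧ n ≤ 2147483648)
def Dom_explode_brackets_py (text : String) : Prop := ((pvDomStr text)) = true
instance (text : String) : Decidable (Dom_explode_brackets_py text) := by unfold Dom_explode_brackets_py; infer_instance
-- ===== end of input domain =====

-- B replaces A's membership guard + eight sequential full-string replace passes with a
-- single pass that pads each bracket/quote character with spaces (idiomatic join); same return value.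

-- ===== PORT A =====
-- brackets = "\"'([{}])"
def pvBracketsA : List Char := ['\"', '\'', '(', '[', '{', '}', ']', ')']

def explode_brackets_py (text : String) : String :=
  let exploded := text
  if pvBracketsA.any (fun ch => PySem.Str.isIn (String.ofList [ch]) text) then
    pvBracketsA.foldl
      (fun e ch => PySem.Str.replace e (String.ofList [ch]) (String.ofList [' ', ch, ' '])) exploded
  else exploded

-- ===== PORT B =====
-- _BRACKETS = set("\"'([{}])")  (a PySem set of distinct chars, here a literal distinct list)
def pvBracketsB : List Char := ['\"', '\'', '(', '[', '{', '}', ']', ')']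

def explode_brackets_py_alt (text : String) : String :=
  String.ofList (text.toList.flatMap (fun c => if pvBracketsB.contains c then [' ', c, ' '] else [c]))

-- ===== PRECONDITION & SPEC =====
def Spec_explode_brackets_py (text : String) (out : String) : Prop := out = explode_brackets_py_alt text
instance (text : String) (out : String) : Decidable (Spec_explode_brackets_py text out) := by unfold Spec_explode_brackets_py; infer_instance

-- ===== CLAIM (what is proved, stated in full; the proofs are below) =====
def Claim_equal_explode_brackets_py : Prop := ∀ (text : String), Dom_explode_brackets_py text → Spec_explode_brackets_py text (explode_brackets_py text)

-- ===== LEMMAS AND PROOFS =====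

-- replace with a single-char pattern is a flatMap (fuel-indexed loop of PySem.Chars.replace)
theorem pv_go_single (b : Char) (new : List Char) :
    ∀ (l acc : List Char) (fuel : Nat), l.length ≤ fuel →
      PySem.Chars.replace.go [b] new fuel l acc
        = acc.reverse ++ l.flatMap (fun c => if c = b then new else [c]) := by
  intro l
  induction l with
  | nil =>
      intro acc fuel _
      cases fuel <;> simp [PySem.Chars.replace.go]
  | cons c t ih =>
      intro acc fuel hf
      cases fuel with
      | zero => simp at hf
      | succ n =>
        by_cases hcb : c = b
        · subst hcb
          rw [PySem.Chars.replace.go]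
          simp only [List.isPrefixOf, beq_self_eq_true, Bool.true_and,
            if_true, List.length_cons, List.length_nil, List.drop_succ_cons, List.drop_zero]
          rw [ih (new.reverse ++ acc) n (by simpa using hf)]
          simp
        · rw [PySem.Chars.replace.go]
          simp only [List.isPrefixOf, Bool.and_eq_true, beq_iff_eq]
          rw [if_neg (by simpa using fun h => hcb h.symm)]
          rw [ih (c :: acc) n (by simpa using hf)]
          simp [hcb]

theorem pv_replace_single (b : Char) (new l : List Char) :
    PySem.Chars.replace l [b] new = l.flatMap (fun c => if c = b then new else [c]) := by
  rw [PySem.Chars.replace, if_neg (by simp)]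
  exact pv_go_single b new l [] l.length le_rfl

-- folding single-char explosions over a distinct, space-free list is one membership flatMap
theorem pv_foldl_explode (bs : List Char) (hn : bs.Nodup) (hs : ' ' ∉ bs) :
    ∀ l : List Char,
      bs.foldl (fun e b => e.flatMap (fun c => if c = b then [' ', b, ' '] else [c])) l
        = l.flatMap (fun c => if c ∈ bs then [' ', c, ' '] else [c]) := by
  induction bs with
  | nil => intro l; simp
  | cons b bs ih =>
      intro l
      have hn' : bs.Nodup := (List.nodup_cons.mp hn).2
      have hb : b ∉ bs := (List.nodup_cons.mp hn).1
      have hs' : ' ' ∉ bs := fun h => hs (List.mem_cons_of_mem _ h)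
      rw [List.foldl_cons, ih hn' hs', List.flatMap_assoc]
      apply List.flatMap_congr
      intro c _
      by_cases hcb : c = b
      · subst hcb
        simp [hb, hs']
      · simp [hcb]

theorem pv_explode_toList (text : String) :
    (explode_brackets_py_alt text).toList
      = text.toList.flatMap (fun c => if c ∈ pvBracketsB then [' ', c, ' '] else [c]) := by
  unfold explode_brackets_py_alt
  rw [String.toList_ofList]
  apply List.flatMap_congr
  intro c _
  simp

-- ===== VERDICT (by name: the statement is the Claim_ definition above) =====
theorem explode_brackets_py_spec : Claim_equal_explode_brackets_py := by
  intro text _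
  unfold Spec_explode_brackets_py
  have key : (explode_brackets_py text).toList = (explode_brackets_py_alt text).toList := by
    rw [pv_explode_toList]
    unfold explode_brackets_py
    by_cases hg : pvBracketsA.any (fun ch => PySem.Str.isIn (String.ofList [ch]) text) = true
    · rw [if_pos hg]
      have hfold : ∀ (bs : List Char) (s : String),
          (bs.foldl (fun e ch => PySem.Str.replace e (String.ofList [ch]) (String.ofList [' ', ch, ' '])) s).toList
            = bs.foldl (fun e b => e.flatMap (fun c => if c = b then [' ', b, ' '] else [c])) s.toList := by
        intro bs
        induction bs with
        | nil => intro s; rfl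
        | cons b bs ih =>
            intro s
            rw [List.foldl_cons, ih, List.foldl_cons]
            congr 1
            rw [PySem.Str.toList_replace, String.toList_ofList, String.toList_ofList]
            exact pv_replace_single b [' ', b, ' '] s.toList
      rw [hfold]
      exact pv_foldl_explode pvBracketsA (by decide) (by decide) text.toList
    · rw [if_neg hg]
      have hnb : ∀ c ∈ text.toList, c ∉ pvBracketsB := by
        intro c hc hmem
        apply hg
        rw [List.any_eq_true]
        refine ⟨c, hmem, ?_⟩
        rw [PySem.Str.isIn_eq, String.toList_ofList, PySem.Chars.isIn_iff_infix]
        exact (List.singleton_infix_iff c text.toList).mpr hc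
      have : text.toList.flatMap (fun c => if c ∈ pvBracketsB then [' ', c, ' '] else [c])
          = text.toList.flatMap (fun c => [c]) := by
        apply List.flatMap_congr
        intro c hc
        rw [if_neg (hnb c hc)]
      rw [this]
      simp
  calc explode_brackets_py text = String.ofList (explode_brackets_py text).toList := by
        rw [String.ofList_toList]
    _ = String.ofList (explode_brackets_py_alt text).toList := by rw [key]
    _ = explode_brackets_py_alt text := by rw [String.ofList_toList]
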